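-- pv_equiv track=rewrite | github.com/SuQiandYing/galgame-tools | Silky's/silky_mes.py | _build_display_text
-- ===== SOURCE A (Python) =====
-- def _build_display_text(parts):
--     """Build a display string from text_parts."""
--     display_parts = []
--     j = 0
--     while j < len(parts):
--         line_idx, text, ptype = parts[j]
--         if ptype == 'ruby_base':
--             if j + 1 < len(parts) and parts[j + 1][2] == 'ruby_reading':
--                 reading = parts[j + 1][1]
--                 display_parts.append('{' + text + '|' + reading + '}')
--                 j += 2
--             else:
--                 display_parts.append(text)
--                 j += 1
--         elif ptype == 'ruby_reading':
--             j += 1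
--         else:
--             display_parts.append(text)
--             j += 1
--     return '\\n'.join(display_parts)
-- ===== SOURCE B (Python) =====
-- def _build_display_text(parts):
--     """Build a display string from text_parts (single pass with a pending base)."""
--     display_parts = []
--     pending_base = None
--     for line_idx, text, ptype in parts:
--         if ptype == 'ruby_base':
--             if pending_base is not None:
--                 display_parts.append(pending_base)
--             pending_base = text
--         elif ptype == 'ruby_reading':
--             if pending_base is not None:
--                 display_parts.append('{' + pending_base + '|' + text + '}')
--                 pending_base = None
--         else:
--             if pending_base is not None:
--                 display_parts.append(pending_base)
--                 pending_base = None
--             display_parts.append(text)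
--     if pending_base is not None:
--         display_parts.append(pending_base)
--     return '\\n'.join(display_parts)
-- ===== Notes on version B (the rewrite author's own statement) =====
-- stated objective: simpler
-- what changed: Replaced the index-based while loop with j+=1/j+=2 lookahead at parts[j+1] by a single for loop over the parts carrying a pending_base variable that is flushed or paired with the next reading.
import Mathlib
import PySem

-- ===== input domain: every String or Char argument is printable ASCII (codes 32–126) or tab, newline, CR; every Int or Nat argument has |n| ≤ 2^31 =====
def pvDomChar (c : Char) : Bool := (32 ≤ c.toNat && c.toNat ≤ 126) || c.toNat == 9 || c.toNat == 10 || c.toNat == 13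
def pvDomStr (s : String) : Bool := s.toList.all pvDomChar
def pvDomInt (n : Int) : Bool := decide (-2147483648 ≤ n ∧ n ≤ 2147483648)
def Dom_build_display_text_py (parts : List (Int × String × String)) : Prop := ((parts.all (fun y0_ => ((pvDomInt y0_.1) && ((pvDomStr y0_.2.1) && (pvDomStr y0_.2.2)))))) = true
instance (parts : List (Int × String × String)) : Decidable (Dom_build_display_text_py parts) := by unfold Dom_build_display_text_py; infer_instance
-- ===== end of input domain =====

-- B replaces A's index-with-lookahead while loop by a single pass carrying a pending ruby base (objective: simpler decomposition, same cost).

-- ===== PORT A =====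
-- A's while loop advances j by 1 or 2; ported as recursion on the remaining list,
-- with the 'parts[j+1]' lookahead as a pattern match on the next element.
def build_display_text_py_go (parts : List (Int × String × String)) : List String :=
  match parts with
  | [] => []
  | (_, text, ptype) :: rest =>
    if ptype == "ruby_base" then
      match rest with
      | (i2, reading, ptype2) :: rest2 =>
        if ptype2 == "ruby_reading" then
          ("{" ++ text ++ "|" ++ reading ++ "}") :: build_display_text_py_go rest2
        else
          text :: build_display_text_py_go ((i2, reading, ptype2) :: rest2)
      | [] => text :: build_display_text_py_go []
    else if ptype == "ruby_reading" then
      build_display_text_py_go rest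
    else
      text :: build_display_text_py_go rest
termination_by parts.length
decreasing_by all_goals (simp only [List.length_cons, List.length_nil]; omega)

def build_display_text_py (parts : List (Int × String × String)) : String :=
  PySem.Str.join "\\n" (build_display_text_py_go parts)

-- ===== PORT B =====
-- B's for loop with the pending_base variable; the Option String is pending_base.
def build_display_text_py_alt_go (parts : List (Int × String × String)) (pending : Option String) : List String :=
  match parts with
  | [] =>
    match pending with
    | some b => [b]
    | none => []
  | (_, text, ptype) :: rest =>
    if ptype == "ruby_base" then
      match pending with
      | some b => b :: build_display_text_py_alt_go rest (some text)
      | none => build_display_text_py_alt_go rest (some text)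
    else if ptype == "ruby_reading" then
      match pending with
      | some b => ("{" ++ b ++ "|" ++ text ++ "}") :: build_display_text_py_alt_go rest none
      | none => build_display_text_py_alt_go rest none
    else
      match pending with
      | some b => b :: text :: build_display_text_py_alt_go rest none
      | none => text :: build_display_text_py_alt_go rest none

def build_display_text_py_alt (parts : List (Int × String × String)) : String :=
  PySem.Str.join "\\n" (build_display_text_py_alt_go parts none)

-- ===== PRECONDITION & SPEC =====
def Spec_build_display_text_py (parts : List (Int × String × String)) (out : String) : Prop := out = build_display_text_py_alt parts
instance (parts : List (Int × String × String)) (out : String) : Decidable (Spec_build_display_text_py parts out) := by unfold Spec_build_display_text_py; infer_instance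

-- ===== CLAIM (what is proved, stated in full; the proofs are below) =====
def Claim_equal_build_display_text_py : Prop := ∀ (parts : List (Int × String × String)), Dom_build_display_text_py parts → Spec_build_display_text_py parts (build_display_text_py parts)

-- ===== LEMMAS AND PROOFS =====

-- What A's loop does when the part it currently faces is a ruby_base with text b
-- (the lookahead case of build_display_text_py_go, written out as its own function).
def goPendingA (b : String) (parts : List (Int × String × String)) : List String :=
  match parts with
  | (_, reading, ptype2) :: rest2 =>
    if ptype2 == "ruby_reading" then
      ("{" ++ b ++ "|" ++ reading ++ "}") :: build_display_text_py_go rest2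
    else
      b :: build_display_text_py_go parts
  | [] => [b]

theorem go_nil : build_display_text_py_go [] = [] := by
  rw [build_display_text_py_go.eq_def]

theorem go_cons_reading (i : Int) (text : String) (tl : List (Int × String × String)) :
    build_display_text_py_go ((i, text, "ruby_reading") :: tl) = build_display_text_py_go tl := by
  conv_lhs => rw [build_display_text_py_go.eq_def]
  simp

theorem go_cons_other (i : Int) (text ptype : String) (tl : List (Int × String × String))
    (h1 : (ptype == "ruby_base") = false) (h2 : (ptype == "ruby_reading") = false) :
    build_display_text_py_go ((i, text, ptype) :: tl) = text :: build_display_text_py_go tl := by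
  conv_lhs => rw [build_display_text_py_go.eq_def]
  simp [h1, h2]

theorem go_cons_base (i : Int) (b : String) (parts : List (Int × String × String)) :
    build_display_text_py_go ((i, b, "ruby_base") :: parts) = goPendingA b parts := by
  conv_lhs => rw [build_display_text_py_go.eq_def]
  cases parts with
  | nil => simp [goPendingA, go_nil]
  | cons hd tl =>
    obtain ⟨i2, t2, ty2⟩ := hd
    by_cases h : ty2 == "ruby_reading" <;> simp [goPendingA, h]

-- Invariant: B with no pending base equals A's loop; B with pending base b equals
-- A's loop facing a ruby_base part with text b.
theorem go_agree (parts : List (Int × String × String)) :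
    build_display_text_py_alt_go parts none = build_display_text_py_go parts ∧
    ∀ b : String, build_display_text_py_alt_go parts (some b) = goPendingA b parts := by
  induction parts with
  | nil => simp [go_nil, build_display_text_py_alt_go, goPendingA]
  | cons hd tl ih =>
    obtain ⟨i, text, ptype⟩ := hd
    by_cases h1 : ptype == "ruby_base"
    · have hp : ptype = "ruby_base" := by simpa using h1
      subst hp
      refine ⟨?_, fun b => ?_⟩
      · rw [go_cons_base i]
        simp [build_display_text_py_alt_go, ih.2]
      · rw [show goPendingA b ((i, text, "ruby_base") :: tl)
              = b :: build_display_text_py_go ((i, text, "ruby_base") :: tl) by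
            simp [goPendingA]]
        rw [go_cons_base i]
        simp [build_display_text_py_alt_go, ih.2]
    · by_cases h2 : ptype == "ruby_reading"
      · have hp : ptype = "ruby_reading" := by simpa using h2
        subst hp
        refine ⟨?_, fun b => ?_⟩
        · rw [go_cons_reading]
          simp [build_display_text_py_alt_go, ih.1]
        · simp [build_display_text_py_alt_go, goPendingA, ih.1]
      · have h1' : (ptype == "ruby_base") = false := by simpa using h1
        have h2' : (ptype == "ruby_reading") = false := by simpa using h2
        refine ⟨?_, fun b => ?_⟩
        · rw [go_cons_other i text ptype tl h1' h2']
          simp [build_display_text_py_alt_go, h1', h2', ih.1]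
        · rw [show goPendingA b ((i, text, ptype) :: tl)
              = b :: build_display_text_py_go ((i, text, ptype) :: tl) by
            simp [goPendingA, h2']]
        
          rw [go_cons_other i text ptype tl h1' h2']
          simp [build_display_text_py_alt_go, h1', h2', ih.1]

-- ===== VERDICT (by name: the statement is the Claim_ definition above) =====
theorem build_display_text_py_spec : Claim_equal_build_display_text_py := by
  intro parts _
  unfold Spec_build_display_text_py build_display_text_py build_display_text_py_alt
  rw [(go_agree parts).1]
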